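-- pv_equiv track=rewrite | github.com/Cordycepsers/proposal_master | src/agents/analysis_agent.py | _categorize_criteria
-- ===== SOURCE A (Python) =====
-- def _categorize_criteria(criteria_text: str) -> str:
--     """Categorize evaluation criteria."""
--     text_lower = criteria_text.lower()
--
--     if any(word in text_lower for word in ['cost', 'price', 'budget', 'financial']):
--         return 'cost'
--     elif any(word in text_lower for word in ['technical', 'technology', 'solution', 'approach']):
--         return 'technical'
--     elif any(word in text_lower for word in ['experience', 'qualification', 'team', 'expertise']):
--         return 'qualifications'
--     elif any(word in text_lower for word in ['schedule', 'timeline', 'delivery', 'time']):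
--         return 'schedule'
--     else:
--         return 'other'
-- ===== SOURCE B (Python) =====
-- # Single left-to-right scan over text positions with a min-priority accumulator:
-- # at each position, note which keywords start there and keep the smallest group
-- # index seen; finally map the best index to its label ('other' if none matched).
-- _KEYWORDS = [
--     ('cost', 0), ('price', 0), ('budget', 0), ('financial', 0),
--     ('technical', 1), ('technology', 1), ('solution', 1), ('approach', 1),
--     ('experience', 2), ('qualification', 2), ('team', 2), ('expertise', 2),
--     ('schedule', 3), ('timeline', 3), ('delivery', 3), ('time', 3),
-- ]
-- _LABELS = ['cost', 'technical', 'qualifications', 'schedule']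
--
-- def _categorize_criteria(criteria_text: str) -> str:
--     t = criteria_text.lower()
--     best = 4
--     for i in range(len(t)):
--         for w, g in _KEYWORDS:
--             if t.startswith(w, i):
--                 best = min(best, g)
--     return _LABELS[best] if best < 4 else 'other'
-- ===== Notes on version B (the rewrite author's own statement) =====
-- stated objective: alternative
-- what changed: Replaces A's category-major chain of substring searches by a single position-major scan of the text: at each character position B checks which keywords start there and folds a min-priority accumulator, mapping the minimum matched group index to its label at the end.
import Mathlib
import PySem

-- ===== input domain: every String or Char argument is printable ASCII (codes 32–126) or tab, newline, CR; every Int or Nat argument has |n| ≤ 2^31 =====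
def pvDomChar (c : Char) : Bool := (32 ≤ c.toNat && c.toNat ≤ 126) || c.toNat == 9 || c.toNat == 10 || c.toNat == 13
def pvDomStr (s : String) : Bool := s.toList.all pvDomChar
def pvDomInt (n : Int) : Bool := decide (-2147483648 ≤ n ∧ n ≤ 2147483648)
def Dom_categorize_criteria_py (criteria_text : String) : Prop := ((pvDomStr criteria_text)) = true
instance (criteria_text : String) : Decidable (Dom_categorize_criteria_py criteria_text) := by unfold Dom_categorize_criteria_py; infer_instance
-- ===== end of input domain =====

-- B replaces A's category-major chain of substring searches by one position-major scan of the text with a min-priority accumulator (alternative; same cost).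

-- ===== PORT A =====
def categorize_criteria_py (criteria_text : String) : String :=
  let text_lower := PySem.Str.lower criteria_text
  if (["cost", "price", "budget", "financial"].any (fun word => PySem.Str.isIn word text_lower)) then
    "cost"
  else if (["technical", "technology", "solution", "approach"].any (fun word => PySem.Str.isIn word text_lower)) then
    "technical"
  else if (["experience", "qualification", "team", "expertise"].any (fun word => PySem.Str.isIn word text_lower)) then
    "qualifications"
  else if (["schedule", "timeline", "delivery", "time"].any (fun word => PySem.Str.isIn word text_lower)) then
    "schedule"
  else
    "other"

-- ===== PORT B =====
def pvKeywords : List (String × Nat) :=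
  [("cost", 0), ("price", 0), ("budget", 0), ("financial", 0),
   ("technical", 1), ("technology", 1), ("solution", 1), ("approach", 1),
   ("experience", 2), ("qualification", 2), ("team", 2), ("expertise", 2),
   ("schedule", 3), ("timeline", 3), ("delivery", 3), ("time", 3)]

def pvLabels : List String := ["cost", "technical", "qualifications", "schedule"]

-- Python's t.startswith(w, i) with 0 ≤ i ≤ len(t) is exactly: w's chars are a prefix of t's chars from i on.
def categorize_criteria_py_alt (criteria_text : String) : String :=
  let t := (PySem.Str.lower criteria_text).toList
  let best := (List.range t.length).foldl
    (fun best i =>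
      pvKeywords.foldl
        (fun b wg => if wg.1.toList.isPrefixOf (t.drop i) then min b wg.2 else b) best) 4
  if best < 4 then pvLabels.getD best "other" else "other"

-- ===== PRECONDITION & SPEC =====
def Spec_categorize_criteria_py (criteria_text : String) (out : String) : Prop := out = categorize_criteria_py_alt criteria_text
instance (criteria_text : String) (out : String) : Decidable (Spec_categorize_criteria_py criteria_text out) := by unfold Spec_categorize_criteria_py; infer_instance

-- ===== CLAIM (what is proved, stated in full; the proofs are below) =====
def Claim_equal_categorize_criteria_py : Prop := ∀ (criteria_text : String), Dom_categorize_criteria_py criteria_text → Spec_categorize_criteria_py criteria_text (categorize_criteria_py criteria_text)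

-- ===== LEMMAS AND PROOFS =====

-- the inner (per-position) loop of B, named for the proofs
def pvStep (t : List Char) (i : Nat) (b : Nat) : Nat :=
  pvKeywords.foldl (fun b wg => if wg.1.toList.isPrefixOf (t.drop i) then min b wg.2 else b) b

-- the inner fold never increases best, is ≤ the group of every keyword starting at i,
-- and is either unchanged or the group of some keyword starting at i
lemma pvInner (t : List Char) (i : Nat) (L : List (String × Nat)) :
    ∀ (b : Nat),
      (L.foldl (fun b wg => if wg.1.toList.isPrefixOf (t.drop i) then min b wg.2 else b) b) ≤ b
      ∧ (∀ wg ∈ L, wg.1.toList <+: t.drop i →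
          (L.foldl (fun b wg => if wg.1.toList.isPrefixOf (t.drop i) then min b wg.2 else b) b) ≤ wg.2)
      ∧ ((L.foldl (fun b wg => if wg.1.toList.isPrefixOf (t.drop i) then min b wg.2 else b) b) = b
         ∨ ∃ wg ∈ L, wg.1.toList <+: t.drop i
             ∧ (L.foldl (fun b wg => if wg.1.toList.isPrefixOf (t.drop i) then min b wg.2 else b) b) = wg.2) := by
  induction L with
  | nil => simp
  | cons wg L ih =>
    intro b
    simp only [List.foldl_cons]
    set b' := if wg.1.toList.isPrefixOf (t.drop i) then min b wg.2 else b with hb'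
    obtain ⟨h1, h2, h3⟩ := ih b'
    have hb'le : b' ≤ b := by
      rw [hb']; split <;> omega
    refine ⟨h1.trans hb'le, ?_, ?_⟩
    · intro x hx hpref
      rcases List.mem_cons.mp hx with rfl | hx
      · have : x.1.toList.isPrefixOf (t.drop i) = true := List.isPrefixOf_iff_prefix.mpr hpref
        have : b' ≤ x.2 := by rw [hb', if_pos this]; omega
        exact h1.trans this
      · exact h2 x hx hpref
    · rcases h3 with h3 | ⟨x, hx, hp, he⟩
      · by_cases hpf : wg.1.toList.isPrefixOf (t.drop i)
        · have hpref : wg.1.toList <+: t.drop i := List.isPrefixOf_iff_prefix.mp hpf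
          have hbe : b' = min b wg.2 := by rw [hb', if_pos hpf]
          rcases Nat.le_total b wg.2 with hle | hle
          · left; rw [h3, hbe]; omega
          · right; exact ⟨wg, List.mem_cons_self .., hpref, by rw [h3, hbe]; omega⟩
        · left; rw [h3, hb', if_neg hpf]
      · right; exact ⟨x, List.mem_cons_of_mem _ hx, hp, he⟩

-- the same three invariants for the outer scan over positions 0..n-1
lemma pvOuter (t : List Char) :
    ∀ (n b : Nat),
      ((List.range n).foldl (fun b i => pvStep t i b) b) ≤ b
      ∧ (∀ wg ∈ pvKeywords, (∃ i, i < n ∧ wg.1.toList <+: t.drop i) →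
          ((List.range n).foldl (fun b i => pvStep t i b) b) ≤ wg.2)
      ∧ (((List.range n).foldl (fun b i => pvStep t i b) b) = b
         ∨ ∃ wg ∈ pvKeywords, (∃ i, i < n ∧ wg.1.toList <+: t.drop i)
             ∧ ((List.range n).foldl (fun b i => pvStep t i b) b) = wg.2) := by
  intro n
  induction n with
  | zero => simp
  | succ n ih =>
    intro b
    obtain ⟨h1, h2, h3⟩ := ih b
    set r := (List.range n).foldl (fun b i => pvStep t i b) b with hr
    have hfold : (List.range (n+1)).foldl (fun b i => pvStep t i b) b = pvStep t n r := by
      rw [List.range_succ, List.foldl_append, List.foldl_cons, List.foldl_nil]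
    obtain ⟨g1, g2, g3⟩ := pvInner t n pvKeywords r
    rw [hfold]; simp only [pvStep]
    refine ⟨g1.trans h1, ?_, ?_⟩
    · intro wg hwg ⟨i, hi, hpref⟩
      rcases Nat.lt_succ_iff_lt_or_eq.mp hi with hi | rfl
      · exact g1.trans (h2 wg hwg ⟨i, hi, hpref⟩)
      · exact g2 wg hwg hpref
    · rcases g3 with g3 | ⟨wg, hwg, hp, he⟩
      · rw [g3]
        rcases h3 with h3 | ⟨wg, hwg, ⟨i, hi, hp⟩, he⟩
        · exact .inl h3
        · exact .inr ⟨wg, hwg, ⟨i, Nat.lt_succ_of_lt hi, hp⟩, he⟩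
      · exact .inr ⟨wg, hwg, ⟨n, Nat.lt_succ_self n, hp⟩, he⟩

-- a nonempty word is a substring iff it starts at some position < length
lemma pvInfix_iff (w t : List Char) (hw : w ≠ []) :
    w <:+: t ↔ ∃ i, i < t.length ∧ w <+: t.drop i := by
  constructor
  · rintro ⟨s₁, s₂, rfl⟩
    refine ⟨s₁.length, ?_, ?_⟩
    · have : 0 < w.length := List.length_pos_iff.mpr hw
      simp [List.length_append]; omega
    · rw [List.append_assoc, List.drop_left]
      exact ⟨s₂, rfl⟩
  · rintro ⟨i, hi, r, hr⟩
    refine ⟨t.take i, r, ?_⟩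
    rw [List.append_assoc, hr, List.take_append_drop]

-- ===== VERDICT (by name: the statement is the Claim_ definition above) =====
theorem categorize_criteria_py_spec : Claim_equal_categorize_criteria_py := by
  intro c _
  unfold Spec_categorize_criteria_py
  simp only [categorize_criteria_py, categorize_criteria_py_alt]
  set s := PySem.Str.lower c with hs
  set t := s.toList with ht
  rw [show (List.range t.length).foldl
        (fun best i => pvKeywords.foldl
          (fun b wg => if wg.1.toList.isPrefixOf (t.drop i) then min b wg.2 else b) best) 4
      = (List.range t.length).foldl (fun b i => pvStep t i b) 4 from rfl]
  obtain ⟨h1, h2, h3⟩ := pvOuter t t.length 4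
  set best := (List.range t.length).foldl (fun b i => pvStep t i b) 4 with hbest
  have hne : ∀ wg ∈ pvKeywords, wg.1.toList ≠ [] := by decide
  have H2 : ∀ wg ∈ pvKeywords, wg.1.toList <:+: t → best ≤ wg.2 := by
    intro wg hwg hinf
    exact h2 wg hwg ((pvInfix_iff _ _ (hne wg hwg)).mp hinf)
  have H3 : best = 4 ∨ ∃ wg ∈ pvKeywords, wg.1.toList <:+: t ∧ best = wg.2 := by
    rcases h3 with h | ⟨wg, hwg, ⟨i, hi, hp⟩, he⟩
    · exact .inl h
    · exact .inr ⟨wg, hwg, (pvInfix_iff _ _ (hne wg hwg)).mpr ⟨i, hi, hp⟩, he⟩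
  have hA : ∀ (ws : List String), (ws.any (fun w => PySem.Str.isIn w s) = true) ↔ ∃ w ∈ ws, w.toList <:+: t := by
    intro ws
    simp only [List.any_eq_true, PySem.Str.isIn_iff_infix, ← ht]
  have m0 : ∀ w ∈ (["cost", "price", "budget", "financial"] : List String), (w, 0) ∈ pvKeywords := by decide
  have m1 : ∀ w ∈ (["technical", "technology", "solution", "approach"] : List String), (w, 1) ∈ pvKeywords := by decide
  have m2 : ∀ w ∈ (["experience", "qualification", "team", "expertise"] : List String), (w, 2) ∈ pvKeywords := by decide
  have m3 : ∀ w ∈ (["schedule", "timeline", "delivery", "time"] : List String), (w, 3) ∈ pvKeywords := by decide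
  have m0' : ∀ wg ∈ pvKeywords, wg.2 = 0 → wg.1 ∈ (["cost", "price", "budget", "financial"] : List String) := by decide
  have m1' : ∀ wg ∈ pvKeywords, wg.2 = 1 → wg.1 ∈ (["technical", "technology", "solution", "approach"] : List String) := by decide
  have m2' : ∀ wg ∈ pvKeywords, wg.2 = 2 → wg.1 ∈ (["experience", "qualification", "team", "expertise"] : List String) := by decide
  have m3' : ∀ wg ∈ pvKeywords, wg.2 = 3 → wg.1 ∈ (["schedule", "timeline", "delivery", "time"] : List String) := by decide
  by_cases h0 : ∃ w ∈ (["cost", "price", "budget", "financial"] : List String), w.toList <:+: t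
  · obtain ⟨w, hw, hinf⟩ := h0
    have hb : best = 0 := Nat.le_zero.mp (H2 (w, 0) (m0 w hw) hinf)
    rw [if_pos ((hA _).mpr ⟨w, hw, hinf⟩), hb]
    decide
  · have nc0 : ¬ ((["cost", "price", "budget", "financial"] : List String).any (fun w => PySem.Str.isIn w s) = true) :=
      fun hc => h0 ((hA _).mp hc)
    have ne0 : best ≠ 0 := by
      intro hb
      rcases H3 with h | ⟨wg, hwg, hinf, he⟩
      · omega
      · exact h0 ⟨wg.1, m0' wg hwg (by omega), hinf⟩
    rw [if_neg nc0]
    by_cases h1' : ∃ w ∈ (["technical", "technology", "solution", "approach"] : List String), w.toList <:+: t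
    · obtain ⟨w, hw, hinf⟩ := h1'
      have hle : best ≤ 1 := H2 (w, 1) (m1 w hw) hinf
      have hb : best = 1 := by omega
      rw [if_pos ((hA _).mpr ⟨w, hw, hinf⟩), hb]
      decide
    · have nc1 : ¬ ((["technical", "technology", "solution", "approach"] : List String).any (fun w => PySem.Str.isIn w s) = true) :=
        fun hc => h1' ((hA _).mp hc)
      have ne1 : best ≠ 1 := by
        intro hb
        rcases H3 with h | ⟨wg, hwg, hinf, he⟩
        · omega
        · exact h1' ⟨wg.1, m1' wg hwg (by omega), hinf⟩
      rw [if_neg nc1]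
      by_cases h2' : ∃ w ∈ (["experience", "qualification", "team", "expertise"] : List String), w.toList <:+: t
      · obtain ⟨w, hw, hinf⟩ := h2'
        have hle : best ≤ 2 := H2 (w, 2) (m2 w hw) hinf
        have hb : best = 2 := by omega
        rw [if_pos ((hA _).mpr ⟨w, hw, hinf⟩), hb]
        decide
      · have nc2 : ¬ ((["experience", "qualification", "team", "expertise"] : List String).any (fun w => PySem.Str.isIn w s) = true) :=
          fun hc => h2' ((hA _).mp hc)
        have ne2 : best ≠ 2 := by
          intro hb
          rcases H3 with h | ⟨wg, hwg, hinf, he⟩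
          · omega
          · exact h2' ⟨wg.1, m2' wg hwg (by omega), hinf⟩
        rw [if_neg nc2]
        by_cases h3' : ∃ w ∈ (["schedule", "timeline", "delivery", "time"] : List String), w.toList <:+: t
        · obtain ⟨w, hw, hinf⟩ := h3'
          have hle : best ≤ 3 := H2 (w, 3) (m3 w hw) hinf
          have hb : best = 3 := by omega
          rw [if_pos ((hA _).mpr ⟨w, hw, hinf⟩), hb]
          decide
        · have nc3 : ¬ ((["schedule", "timeline", "delivery", "time"] : List String).any (fun w => PySem.Str.isIn w s) = true) :=
            fun hc => h3' ((hA _).mp hc)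
          have ne3 : best ≠ 3 := by
            intro hb
            rcases H3 with h | ⟨wg, hwg, hinf, he⟩
            · omega
            · exact h3' ⟨wg.1, m3' wg hwg (by omega), hinf⟩
          have hb : best = 4 := by omega
          rw [if_neg nc3, hb]
          decide
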